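-- pv_equiv track=rewrite | github.com/RafaelGalvaoRN/monitor_escolar | arquivos_python/utils_processamento.py | _strip_trailing_semicolons_outside_quotes
-- ===== SOURCE A (Python) =====
-- def _strip_trailing_semicolons_outside_quotes(line: str, quotechar: str = '"') -> str:
--     # Remove ;/espaços APENAS no FINAL da linha e APENAS se estivermos fora de aspas
--     inside = False
--     j = 0
--     while j < len(line):
--         c = line[j]
--         if c == quotechar:
--             if j + 1 < len(line) and line[j+1] == quotechar:
--                 j += 2; continue
--             inside = not inside
--         j += 1
--     if inside:
--         return line
--     while line and line[-1] in (";", " ", "\t"):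
--         line = line[:-1]
--     return line
-- ===== SOURCE B (Python) =====
-- def _strip_trailing_semicolons_outside_quotes(line: str, quotechar: str = '"') -> str:
--     # Doubled quotechars ("" escapes) pair up, so the line ends inside quotes
--     # exactly when the total number of quotechars is odd (single-char quotechar;
--     # any other quotechar can never quote a single character of the line).
--     if len(quotechar) == 1 and line.count(quotechar) % 2 == 1:
--         return line
--     return line.rstrip("; \t")
-- ===== Notes on version B (the rewrite author's own statement) =====
-- stated objective: faster
-- what changed: Replaces A's index-walking quote state machine and its repeated line[:-1] slice loop by a single count-parity test (doubled quotechars pair up, so the line ends inside quotes iff the quotechar count is odd) plus one rstrip call.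
import Mathlib
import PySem

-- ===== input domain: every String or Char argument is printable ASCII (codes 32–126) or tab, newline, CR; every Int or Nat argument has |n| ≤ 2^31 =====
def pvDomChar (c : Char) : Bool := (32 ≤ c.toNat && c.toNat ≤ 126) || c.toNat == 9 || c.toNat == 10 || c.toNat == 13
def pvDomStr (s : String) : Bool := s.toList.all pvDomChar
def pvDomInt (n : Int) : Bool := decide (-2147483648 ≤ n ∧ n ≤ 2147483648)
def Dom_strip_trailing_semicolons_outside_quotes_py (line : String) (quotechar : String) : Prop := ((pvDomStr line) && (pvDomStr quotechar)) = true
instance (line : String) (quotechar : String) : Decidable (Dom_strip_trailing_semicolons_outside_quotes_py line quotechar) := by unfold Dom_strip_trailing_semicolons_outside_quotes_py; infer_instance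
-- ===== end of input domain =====

-- B replaces A's index-walking quote state machine and its last-char slice loop by a
-- quotechar-count parity test plus rstrip (objective: faster, simpler).

-- ===== PORT A =====
-- the 'while j < len(line)' scan: walks the chars, skipping doubled quotechars,
-- toggling 'inside' on a single quotechar (line[j] == quotechar compares a
-- one-char string with quotechar, hence String.ofList [c] == quotechar)
def pvScanA (quotechar : String) : List Char → Bool → Bool
  | [], inside => inside
  | c :: rest, inside =>
    if String.ofList [c] == quotechar then
      match rest with
      | c2 :: rest2 =>
        if String.ofList [c2] == quotechar then pvScanA quotechar rest2 inside
        else pvScanA quotechar (c2 :: rest2) (!inside)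
      | [] => pvScanA quotechar [] (!inside)
    else pvScanA quotechar rest inside

-- the 'while line and line[-1] in (";", " ", "\t"): line = line[:-1]' loop
def pvTrimA (l : List Char) : List Char :=
  if h : l ≠ [] then
    if l.getLast h == ';' || l.getLast h == ' ' || l.getLast h == '\t'
    then pvTrimA l.dropLast else l
  else l
termination_by l.length
decreasing_by
  simp only [List.length_dropLast]
  exact Nat.sub_lt (List.length_pos_of_ne_nil h) (by norm_num)

def strip_trailing_semicolons_outside_quotes_py (line : String) (quotechar : String) : String :=
  if pvScanA quotechar line.toList false then line
  else String.ofList (pvTrimA line.toList)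

-- ===== PORT B =====
-- line.count(quotechar) → PySem.Str.count; line.rstrip("; \t") ported by hand as
-- reverse/dropWhile/reverse (exact: rstrip drops exactly the trailing run of these chars)
def strip_trailing_semicolons_outside_quotes_py_alt (line : String) (quotechar : String) : String :=
  if PySem.Str.len quotechar == 1 && PySem.Str.count line quotechar % 2 == 1 then line
  else String.ofList ((line.toList.reverse.dropWhile
      (fun c => c == ';' || c == ' ' || c == '\t')).reverse)

-- ===== PRECONDITION & SPEC =====
def Spec_strip_trailing_semicolons_outside_quotes_py (line : String) (quotechar : String) (out : String) : Prop := out = strip_trailing_semicolons_outside_quotes_py_alt line quotechar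
instance (line : String) (quotechar : String) (out : String) : Decidable (Spec_strip_trailing_semicolons_outside_quotes_py line quotechar out) := by unfold Spec_strip_trailing_semicolons_outside_quotes_py; infer_instance

-- ===== CLAIM (what is proved, stated in full; the proofs are below) =====
def Claim_equal_strip_trailing_semicolons_outside_quotes_py : Prop := ∀ (line : String) (quotechar : String), Dom_strip_trailing_semicolons_outside_quotes_py line quotechar → Spec_strip_trailing_semicolons_outside_quotes_py line quotechar (strip_trailing_semicolons_outside_quotes_py line quotechar)

-- ===== LEMMAS AND PROOFS =====

-- A's trailing-strip loop equals reverse/dropWhile/reverse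
theorem pvTrimA_reverse (r : List Char) :
    pvTrimA r.reverse
      = (r.dropWhile (fun c => c == ';' || c == ' ' || c == '\t')).reverse := by
  induction r with
  | nil => simp [pvTrimA]
  | cons c r' ih =>
    rw [List.reverse_cons, pvTrimA]
    by_cases hp : (c == ';' || c == ' ' || c == '\t') = true
    · simp [hp, ih]
    · simp [hp]

-- one-char string equality reduces to char equality
theorem pvOfList_beq (c q : Char) : (String.ofList [c] == String.ofList [q]) = (c == q) := by
  by_cases h : c = q
  · simp [h]
  · have : String.ofList [c] ≠ String.ofList [q] := by
      intro hx
      have := congrArg String.toList hx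
      simp at this
      exact h this
    simp [h, this]

-- xor-parity step lemma used by the scan characterisation
theorem pvXorSucc (n : Nat) (b : Bool) :
    (b ^^ ((n + 1) % 2 == 1)) = ((!b) ^^ (n % 2 == 1)) := by
  rcases Nat.even_or_odd n with h | h
  · have h0 := Nat.even_iff.mp h
    have h1 : (n + 1) % 2 = 1 := by omega
    simp [h0, h1]
  · have h1 := Nat.odd_iff.mp h
    have h0 : (n + 1) % 2 = 0 := by omega
    simp [h0, h1]

-- A's scan with a single-char quotechar computes the parity of the char count
theorem pvScanA_parity (q : Char) (l : List Char) (b : Bool) :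
    pvScanA (String.ofList [q]) l b = (b.xor (l.count q % 2 == 1)) := by
  fun_induction pvScanA (String.ofList [q]) l b with
  | case1 inside => simp
  | case2 c inside h1 c2 rest2 h2 ih =>
    rw [pvOfList_beq, beq_iff_eq] at h1 h2
    subst h1; subst h2
    rw [ih]
    have hm : (List.count c2 rest2 + 1 + 1) % 2 = List.count c2 rest2 % 2 := by omega
    simp [hm]
  | case3 c inside h1 c2 rest2 h2 ih =>
    rw [pvOfList_beq, beq_iff_eq] at h1
    subst h1
    rw [ih, show List.count c (c :: c2 :: rest2) = List.count c (c2 :: rest2) + 1 from by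
      simp, pvXorSucc]
  | case4 c inside h1 ih =>
    rw [pvOfList_beq, beq_iff_eq] at h1
    subst h1
    simp [pvScanA]
  | case5 c rest inside h1 ih =>
    rw [ih]
    have hne : ¬ c = q := by
      intro h; exact h1 (by rw [pvOfList_beq, beq_iff_eq]; exact h)
    simp [hne]

-- with a quotechar that is not a single char, the scan never toggles
theorem pvScanA_of_len_ne (quotechar : String) (hq : quotechar.length ≠ 1)
    (l : List Char) (b : Bool) : pvScanA quotechar l b = b := by
  induction l generalizing b with
  | nil => simp [pvScanA]
  | cons c rest ih =>
    have hne : (String.ofList [c] == quotechar) = false := by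
      apply beq_eq_false_iff_ne.mpr
      intro h
      apply hq
      rw [← h]
      rw [← String.length_toList]
      simp
    rw [pvScanA.eq_def]
    simp only [hne, Bool.false_eq_true, if_false]
    exact ih b

-- Python's str.count with a single-char needle is List.count
theorem pvCountGo_single (q : Char) (fuel : Nat) (l : List Char) (acc : Nat)
    (hf : l.length ≤ fuel) :
    PySem.Chars.count.go [q] fuel l acc = acc + l.count q := by
  induction fuel generalizing l acc with
  | zero =>
    have : l = [] := List.eq_nil_of_length_eq_zero (Nat.le_zero.mp hf)
    subst this; simp [PySem.Chars.count.go]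
  | succ n ih =>
    cases l with
    | nil => simp [PySem.Chars.count.go]
    | cons h t =>
      rw [PySem.Chars.count.go]
      by_cases hq : q = h
      · subst hq
        have hpre : [q].isPrefixOf (q :: t) = true := by simp [List.isPrefixOf]
        rw [if_pos hpre]
        have hdrop : List.drop ([q] : List Char).length (q :: t) = t := by simp
        rw [hdrop, ih t (acc + 1) (by simpa using hf)]
        simp
        omega
      · have hpre : [q].isPrefixOf (h :: t) = false := by
          simp [List.isPrefixOf]
          exact hq
        rw [if_neg (by simp [hpre])]
        rw [ih t acc (by simpa using hf)]
        simp [Ne.symm hq]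

theorem pvCount_single (s : String) (q : Char) :
    PySem.Str.count s (String.ofList [q]) = s.toList.count q := by
  rw [PySem.Str.count_eq]
  have h1 : (String.ofList [q]).toList = [q] := by simp
  rw [h1, PySem.Chars.count]
  simp only [List.isEmpty_iff, reduceCtorEq, if_false]
  simpa using pvCountGo_single q s.toList.length s.toList 0 le_rfl

-- ===== VERDICT (by name: the statement is the Claim_ definition above) =====
theorem strip_trailing_semicolons_outside_quotes_py_spec : Claim_equal_strip_trailing_semicolons_outside_quotes_py := by
  intro line quotechar _
  unfold Spec_strip_trailing_semicolons_outside_quotes_py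
  unfold strip_trailing_semicolons_outside_quotes_py strip_trailing_semicolons_outside_quotes_py_alt
  have htrim : pvTrimA line.toList
      = (line.toList.reverse.dropWhile (fun c => c == ';' || c == ' ' || c == '\t')).reverse := by
    have h := pvTrimA_reverse line.toList.reverse
    simpa using h
  by_cases h1 : quotechar.length = 1
  · obtain ⟨q, hq⟩ : ∃ q, quotechar = String.ofList [q] := by
      have hl : quotechar.toList.length = 1 := by
        rw [String.length_toList]; exact h1
      rcases List.length_eq_one_iff.mp hl with ⟨q, hq⟩
      exact ⟨q, by rw [← hq]; exact String.ofList_toList.symm⟩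
    subst hq
    have hlen : (PySem.Str.len (String.ofList [q]) == (1 : Int)) = true := by
      simp [PySem.Str.len]
    rw [pvScanA_parity, pvCount_single, hlen, Bool.true_and, Bool.false_xor]
    by_cases hpar : (line.toList.count q % 2 == 1) = true
    · simp [hpar]
    · simp only [hpar, if_neg, Bool.false_eq_true, not_false_eq_true, htrim]
  · have hscan := pvScanA_of_len_ne quotechar h1 line.toList false
    have hlen : (PySem.Str.len quotechar == (1 : Int)) = false := by
      simp [PySem.Str.len]
      intro h
      exact h1 (by rw [← String.length_toList]; exact_mod_cast h)
    rw [hscan, hlen, Bool.false_and]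
    simp [htrim]
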